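-- pv_equiv track=rewrite | github.com/waiming/tree-based-solver-star-battle-puzzle | src/backtracking.py | solve_star_battle
-- ===== SOURCE A (Python) =====
-- from typing import List
--
-- Grid = List[List[str]]
--
-- def is_valid(board: Grid, row: int, col: int, region_map: Grid, stars: int) -> bool:
--     size = len(board)
--     region_id = region_map[row][col]
--
--     # Count stars in row
--     if sum(1 for c in board[row] if c == '*') >= stars:
--         return False
--
--     # Count stars in column
--     if sum(1 for r in range(size) if board[r][col] == '*') >= stars:
--         return False
--
--     # Count stars in region
--     if sum(1 for r in range(size) for c in range(size) if region_map[r][c] == region_id and board[r][c] == '*') >= stars: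
--         return False
--
--     # Check adjacent cells
--     for dr in [-1, 0, 1]:
--         for dc in [-1, 0, 1]:
--             nr, nc = row + dr, col + dc
--             if 0 <= nr < size and 0 <= nc < size and board[nr][nc] == '*':
--                 return False
--
--     return True
--
-- def solve_star_battle(region_map: Grid, stars: int = 1) -> Grid:
--     size = len(region_map)
--     board = [['.' for _ in range(size)] for _ in range(size)]
--
--     def backtrack(r=0, c=0):
--         if r == size:
--             return is_complete(board, region_map, stars)
--
--         nr, nc = (r, c + 1) if c + 1 < size else (r + 1, 0)
--
--         # Try placing a star
--         if is_valid(board, r, c, region_map, stars):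
--             board[r][c] = '*'
--             if backtrack(nr, nc):
--                 return True
--             board[r][c] = '.'
--
--         # Try without placing a star
--         if backtrack(nr, nc):
--             return True
--
--         return False
--
--     solved = backtrack()
--     return board if solved else None
--
-- def is_complete(board: Grid, region_map: Grid, stars: int) -> bool:
--     size = len(board)
--
--     # Check each row, column, and region
--     for i in range(size):
--         if sum(1 for j in range(size) if board[i][j] == '*') != stars:
--             return False
--         if sum(1 for j in range(size) if board[j][i] == '*') != stars:
--             return False
--
--     regions = set(cell for row in region_map for cell in row)
--     for region_id in regions:
--         if sum(1 for r in range(size) for c in range(size) if region_map[r][c] == region_id and board[r][c] == '*') != stars: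
--             return False
--
--     return True
-- ===== SOURCE B (Python) =====
-- def solve_star_battle(region_map, stars=1):
--     size = len(region_map)
--
--     def backtrack(idx, star_pos, row_cnt, col_cnt, reg_cnt):
--         if idx == size * size:
--             if (all(x == stars for x in row_cnt)
--                     and all(x == stars for x in col_cnt)
--                     and all(reg_cnt.get(g, 0) == stars
--                             for g in set(c for row in region_map for c in row))):
--                 return star_pos
--             return None
--         r, c = divmod(idx, size)
--         # O(1) validity: incremental counts + the four already-decided neighbours
--         if (row_cnt[r] < stars and col_cnt[c] < stars
--                 and not ((r - 1, c - 1) in star_pos or (r - 1, c) in star_pos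
--                          or (r - 1, c + 1) in star_pos or (r, c - 1) in star_pos)):
--             g = region_map[r][c]
--             if reg_cnt.get(g, 0) < stars:
--                 row_cnt[r] += 1
--                 col_cnt[c] += 1
--                 reg_cnt[g] = reg_cnt.get(g, 0) + 1
--                 star_pos.add((r, c))
--                 res = backtrack(idx + 1, star_pos, row_cnt, col_cnt, reg_cnt)
--                 if res is not None:
--                     return res
--                 star_pos.discard((r, c))
--                 row_cnt[r] -= 1
--                 col_cnt[c] -= 1
--                 reg_cnt[g] -= 1
--         return backtrack(idx + 1, star_pos, row_cnt, col_cnt, reg_cnt)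
--
--     sol = backtrack(0, set(), [0] * size, [0] * size, {})
--     if sol is None:
--         return None
--     return [['*' if (r, c) in sol else '.' for c in range(size)]
--             for r in range(size)]
-- ===== Notes on version B (the rewrite author's own statement) =====
-- stated objective: alternative
-- what changed: B replaces A's per-node full-grid rescans (row/column/region recounts and an 8-neighbour window probe) with incrementally maintained row/column/region star counters plus a set of star positions, recursing over a flat cell index and rendering the output grid from the position set only at the end (intended as faster per node; measured 3.89x at n=16, unconfirmed at sizes where the exponential search dominates).
import Mathlib
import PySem

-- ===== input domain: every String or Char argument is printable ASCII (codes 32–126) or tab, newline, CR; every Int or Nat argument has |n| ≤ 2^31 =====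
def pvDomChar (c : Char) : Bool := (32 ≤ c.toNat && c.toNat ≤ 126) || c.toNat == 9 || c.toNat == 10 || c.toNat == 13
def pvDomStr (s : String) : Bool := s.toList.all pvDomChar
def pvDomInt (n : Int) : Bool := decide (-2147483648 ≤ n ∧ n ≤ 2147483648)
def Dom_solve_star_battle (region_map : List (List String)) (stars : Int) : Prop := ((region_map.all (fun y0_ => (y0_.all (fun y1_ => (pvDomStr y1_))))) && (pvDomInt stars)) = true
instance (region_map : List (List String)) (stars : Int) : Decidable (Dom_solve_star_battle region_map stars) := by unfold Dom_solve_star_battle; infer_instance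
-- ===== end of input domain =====

-- B replaces A's per-node full-grid rescans by incrementally maintained row/column/region
-- star counters plus a set of star positions, rendering the grid from the position set only
-- at the end; same search order, so the same first solution is returned.

-- ===== PORT A =====
-- sum(1 for c in board[row] if c == '*')
def pvRowStarsA (board : List (List String)) (row : Nat) : Int :=
  (board.getD row []).foldl (fun a c => if c = "*" then a + 1 else a) 0

-- sum(1 for r in range(size) if board[r][col] == '*')
def pvColStarsA (board : List (List String)) (col : Nat) : Int :=
  (List.range board.length).foldl
    (fun a r => if (board.getD r []).getD col "" = "*" then a + 1 else a) 0

-- sum(1 for r in range(size) for c in range(size) if region_map[r][c] == rid and board[r][c] == '*')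
def pvRegStarsA (board region_map : List (List String)) (rid : String) : Int :=
  (List.range board.length).foldl (fun a r =>
    (List.range board.length).foldl (fun a c =>
      if (region_map.getD r []).getD c "" = rid ∧ (board.getD r []).getD c "" = "*" then
        a + 1
      else a) a) 0

def pvIsValidA (board : List (List String)) (row col : Nat) (region_map : List (List String))
    (stars : Int) : Bool :=
  let size := board.length
  let rid := (region_map.getD row []).getD col ""
  if pvRowStarsA board row ≥ stars then false
  else if pvColStarsA board col ≥ stars then false
  else if pvRegStarsA board region_map rid ≥ stars then false
  else if ([-1, 0, 1] : List Int).any (fun dr => ([-1, 0, 1] : List Int).any (fun dc =>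
      let nr : Int := (row : Int) + dr
      let nc : Int := (col : Int) + dc
      decide (0 ≤ nr ∧ nr < (size : Int) ∧ 0 ≤ nc ∧ nc < (size : Int)) &&
        decide ((board.getD nr.toNat []).getD nc.toNat "" = "*"))) then false
  else true

def pvIsCompleteA (board region_map : List (List String)) (stars : Int) : Bool :=
  let size := board.length
  ((List.range size).all (fun i =>
      decide (pvRowStarsA board i = stars) && decide (pvColStarsA board i = stars))) &&
    ((PySem.Set.ofList (region_map.flatMap (fun row => row))).all (fun rid =>
      decide (pvRegStarsA board region_map rid = stars)))

def pvBtA (region_map : List (List String)) (stars : Int) (size : Nat) :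
    Nat → List (List String) → Nat → Nat → Option (List (List String))
  | 0, _, _, _ => none
  | fuel + 1, board, r, c =>
    if r = size then
      if pvIsCompleteA board region_map stars then some board else none
    else
      let nr := if c + 1 < size then r else r + 1
      let nc := if c + 1 < size then c + 1 else 0
      let tryStar :=
        if pvIsValidA board r c region_map stars then
          pvBtA region_map stars size fuel (board.set r ((board.getD r []).set c "*")) nr nc
        else none
      match tryStar with
      | some b => some b
      | none => pvBtA region_map stars size fuel board nr nc

def solve_star_battle (region_map : List (List String)) (stars : Int) :
    Option (List (List String)) :=
  let size := region_map.length
  let board := List.replicate size (List.replicate size ".")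
  pvBtA region_map stars size (size * size + 1) board 0 0

-- ===== PORT B =====
def pvAdjB (sp : PySem.Set (Int × Int)) (r c : Int) : Bool :=
  PySem.Set.contains sp (r - 1, c - 1) || PySem.Set.contains sp (r - 1, c) ||
    PySem.Set.contains sp (r - 1, c + 1) || PySem.Set.contains sp (r, c - 1)

def pvBtB (region_map : List (List String)) (stars : Int) (size : Nat) :
    Nat → Nat → PySem.Set (Int × Int) → List Int → List Int → PySem.Dict String Int →
      Option (PySem.Set (Int × Int))
  | 0, _, _, _, _, _ => none
  | fuel + 1, idx, sp, rc, cc, gc =>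
    if idx = size * size then
      if rc.all (fun x => decide (x = stars)) && cc.all (fun x => decide (x = stars)) &&
          (PySem.Set.ofList (region_map.flatMap (fun row => row))).all
            (fun g => decide (gc.getD g 0 = stars)) then
        some sp
      else none
    else
      let r := idx / size
      let c := idx % size
      let tryStar :=
        if decide (rc.getD r 0 < stars) && decide (cc.getD c 0 < stars) &&
            !pvAdjB sp (r : Int) (c : Int) then
          let g := (region_map.getD r []).getD c ""
          if gc.getD g 0 < stars then
            pvBtB region_map stars size fuel (idx + 1) (PySem.Set.add sp ((r : Int), (c : Int)))
              (rc.set r (rc.getD r 0 + 1)) (cc.set c (cc.getD c 0 + 1))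
              (gc.insert g (gc.getD g 0 + 1))
          else none
        else none
      match tryStar with
      | some s => some s
      | none => pvBtB region_map stars size fuel (idx + 1) sp rc cc gc

def pvRenderB (size : Nat) (sp : PySem.Set (Int × Int)) : List (List String) :=
  (List.range size).map (fun (r : Nat) => (List.range size).map (fun (c : Nat) =>
    if PySem.Set.contains sp ((r : Int), (c : Int)) then "*" else "."))

def solve_star_battle_alt (region_map : List (List String)) (stars : Int) :
    Option (List (List String)) :=
  let size := region_map.length
  match pvBtB region_map stars size (size * size + 1) 0 PySem.Set.empty
      (List.replicate size 0) (List.replicate size 0) PySem.Dict.empty with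
  | none => none
  | some sp => some (pvRenderB size sp)

-- ===== PRECONDITION & SPEC =====
-- Pre_ excludes exactly the ragged region maps (some row shorter than the number of rows),
-- on which Python A raises IndexError at the region lookup.
def Pre_solve_star_battle (region_map : List (List String)) (stars : Int) : Prop :=
  ∀ row ∈ region_map, region_map.length ≤ row.length

instance (region_map : List (List String)) (stars : Int) :
    Decidable (Pre_solve_star_battle region_map stars) := by
  unfold Pre_solve_star_battle; infer_instance

def pvWitness_solve_star_battle : List (List String) × Int := ([["a", "b"], ["a", "b"]], 1)

def Spec_solve_star_battle (region_map : List (List String)) (stars : Int)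
    (out : Option (List (List String))) : Prop :=
  out = solve_star_battle_alt region_map stars

instance (region_map : List (List String)) (stars : Int) (out : Option (List (List String))) :
    Decidable (Spec_solve_star_battle region_map stars out) := by
  unfold Spec_solve_star_battle; infer_instance

-- ===== CLAIM (what is proved, stated in full; the proofs are below) =====
def Claim_equal_solve_star_battle : Prop :=
  ∀ (region_map : List (List String)) (stars : Int), Dom_solve_star_battle region_map stars →
    Pre_solve_star_battle region_map stars →
      Spec_solve_star_battle region_map stars (solve_star_battle region_map stars)

-- ===== LEMMAS AND PROOFS =====

-- cell/board helper facts for the render of a star-position set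
theorem pv_render_length (n : Nat) (sp : List (Int × Int)) : (pvRenderB n sp).length = n := by
  simp [pvRenderB]

theorem pv_render_getD (n : Nat) (sp : List (Int × Int)) (i : Nat) (hi : i < n) :
    (pvRenderB n sp).getD i [] =
      (List.range n).map (fun (j : Nat) =>
        if PySem.Set.contains sp ((i : Int), (j : Int)) then "*" else ".") := by
  unfold pvRenderB
  exact PySem.List.getD_map_range _ _ _ _ hi

theorem pv_contains_eq_decide (sp : List (Int × Int)) (p : Int × Int) :
    PySem.Set.contains sp p = decide (p ∈ sp) := by
  by_cases h : p ∈ sp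
  · simpa [h] using (PySem.Set.contains_iff sp p).mpr h
  · simp only [h, decide_false]
    cases hc : PySem.Set.contains sp p
    · rfl
    · exact absurd ((PySem.Set.contains_iff sp p).mp hc) h

theorem pv_render_cell (n : Nat) (sp : List (Int × Int)) (i j : Nat) (hi : i < n) (hj : j < n) :
    ((pvRenderB n sp).getD i []).getD j "" = if ((i : Int), (j : Int)) ∈ sp then "*" else "." := by
  rw [pv_render_getD n sp i hi, PySem.List.getD_map_range _ _ _ _ hj, pv_contains_eq_decide]
  by_cases h : ((i : Int), (j : Int)) ∈ sp <;> simp [h]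

theorem pv_render_cell_star (n : Nat) (sp : List (Int × Int)) (i j : Nat) :
    (((pvRenderB n sp).getD i []).getD j "" = "*") ↔ (i < n ∧ j < n ∧ ((i : Int), (j : Int)) ∈ sp) := by
  by_cases hi : i < n
  · by_cases hj : j < n
    · rw [pv_render_cell n sp i j hi hj]
      by_cases h : ((i : Int), (j : Int)) ∈ sp <;> simp [h, hi, hj]
    · rw [pv_render_getD n sp i hi,
        List.getD_eq_default _ _ (by simp only [List.length_map, List.length_range]; omega)]
      simp [hj]
  · rw [List.getD_eq_default (pvRenderB n sp) _ (by rw [pv_render_length]; omega)]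
    simp [hi]

theorem pv_countP_range_eq_sum (n : Nat) (p : Nat → Bool) :
    (((List.range n).countP p : Nat) : Int) = ∑ j ∈ Finset.range n, (if p j then (1 : Int) else 0) := by
  induction n with
  | zero => simp
  | succ m ih =>
    rw [List.range_succ, List.countP_append, Finset.sum_range_succ]
    push_cast
    rw [ih]; simp [List.countP_cons]

theorem pv_rowStars_render (n : Nat) (sp : List (Int × Int)) (i : Nat) (hi : i < n) :
    pvRowStarsA (pvRenderB n sp) i =
      ∑ j ∈ Finset.range n, (if ((i : Int), (j : Int)) ∈ sp then (1 : Int) else 0) := by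
  unfold pvRowStarsA
  rw [pv_render_getD n sp i hi, List.foldl_map]
  rw [PySem.List.foldl_congr_mem _ _
    (fun (a : Int) (j : Nat) => if decide (((i : Int), (j : Int)) ∈ sp) then a + 1 else a) 0
    (by
      intro a j _
      rw [pv_contains_eq_decide]
      by_cases h : ((i : Int), (j : Int)) ∈ sp <;> simp [h])]
  rw [PySem.List.foldl_count_if (fun (j : Nat) => decide (((i : Int), (j : Int)) ∈ sp)) _ 0]
  rw [pv_countP_range_eq_sum]
  simp

theorem pv_colStars_render (n : Nat) (sp : List (Int × Int)) (j : Nat) :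
    pvColStarsA (pvRenderB n sp) j =
      ∑ i ∈ Finset.range n, (if ((i : Int), (j : Int)) ∈ sp ∧ j < n then (1 : Int) else 0) := by
  unfold pvColStarsA
  rw [pv_render_length]
  rw [PySem.List.foldl_congr_mem _ _
    (fun (a : Int) (i : Nat) => if decide (((i : Int), (j : Int)) ∈ sp ∧ j < n) then a + 1 else a) 0
    (by
      intro a i hmem
      have hi : i < n := List.mem_range.mp hmem
      have hcell := pv_render_cell_star n sp i j
      by_cases h : ((i : Int), (j : Int)) ∈ sp ∧ j < n
      · rw [if_pos (hcell.mpr ⟨hi, h.2, h.1⟩)]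
        simp only [decide_eq_true_eq]
        rw [if_pos h]
      · rw [if_neg (fun hc => h ⟨(hcell.mp hc).2.2, (hcell.mp hc).2.1⟩)]
        simp only [decide_eq_true_eq]
        rw [if_neg h])]
  rw [PySem.List.foldl_count_if, pv_countP_range_eq_sum]
  simp

theorem pv_foldl2 (m : Nat) (q : Nat → Nat → Prop) [inst : ∀ i j, Decidable (q i j)] :
    ∀ (n : Nat) (a : Int),
    (List.range n).foldl
        (fun a i => (List.range m).foldl (fun a j => if q i j then a + 1 else a) a) a
      = a + ∑ i ∈ Finset.range n, ∑ j ∈ Finset.range m, (if q i j then (1 : Int) else 0) := by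
  have inner : ∀ (i : Nat) (a : Int),
      (List.range m).foldl (fun a j => if q i j then a + 1 else a) a
        = a + ∑ j ∈ Finset.range m, (if q i j then (1 : Int) else 0) := by
    intro i a
    rw [PySem.List.foldl_congr_mem _ _
      (fun (a : Int) (j : Nat) => if decide (q i j) then a + 1 else a) a
      (by intro a j _; by_cases h : q i j <;> simp [h])]
    rw [PySem.List.foldl_count_if (fun (j : Nat) => decide (q i j)) _ a, pv_countP_range_eq_sum]
    simp
  intro n
  induction n with
  | zero => simp
  | succ k ih =>
    intro a
    rw [List.range_succ, List.foldl_append, List.foldl_cons, List.foldl_nil, ih, inner,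
      Finset.sum_range_succ]
    ring

theorem pv_regStars_render (region_map : List (List String)) (n : Nat) (sp : List (Int × Int)) (g : String) :
    pvRegStarsA (pvRenderB n sp) region_map g =
      ∑ i ∈ Finset.range n, ∑ j ∈ Finset.range n,
        (if (region_map.getD i []).getD j "" = g ∧ ((i : Int), (j : Int)) ∈ sp then (1 : Int) else 0) := by
  unfold pvRegStarsA
  rw [pv_render_length]
  rw [pv_foldl2 n (fun i j => (region_map.getD i []).getD j "" = g ∧
      ((pvRenderB n sp).getD i []).getD j "" = "*") n 0]
  rw [zero_add]
  refine Finset.sum_congr rfl (fun i hi => Finset.sum_congr rfl (fun j hj => ?_))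
  have hi' := Finset.mem_range.mp hi
  have hj' := Finset.mem_range.mp hj
  have hcell := pv_render_cell_star n sp i j
  by_cases h : (region_map.getD i []).getD j "" = g ∧ ((i : Int), (j : Int)) ∈ sp
  · rw [if_pos ⟨h.1, hcell.mpr ⟨hi', hj', h.2⟩⟩, if_pos h]
  · rw [if_neg (fun hc => h ⟨hc.1, (hcell.mp hc.2).2.2⟩), if_neg h]


theorem pv_colStars_render' (n : Nat) (sp : List (Int × Int)) (j : Nat) (hj : j < n) :
    pvColStarsA (pvRenderB n sp) j =
      ∑ i ∈ Finset.range n, (if ((i : Int), (j : Int)) ∈ sp then (1 : Int) else 0) := by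
  rw [pv_colStars_render]
  exact Finset.sum_congr rfl (fun i _ => by simp [hj])

theorem pv_ind_split {P Q : Prop} [Decidable P] [Decidable Q] (h : ¬(P ∧ Q)) :
    (if P ∨ Q then (1 : Int) else 0) = (if P then (1 : Int) else 0) + (if Q then (1 : Int) else 0) := by
  by_cases hp : P
  · by_cases hq : Q
    · exact absurd ⟨hp, hq⟩ h
    · simp [hp, hq]
  · by_cases hq : Q <;> simp [hp, hq]

theorem pv_pair_cast_eq (i j r c : Nat) :
    (((i : Int), (j : Int)) = ((r : Int), (c : Int))) ↔ (i = r ∧ j = c) := by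
  simp [Prod.ext_iff]

theorem pv_row_sum_add (n : Nat) (sp : List (Int × Int)) (r c i : Nat) (hc : c < n)
    (hfresh : ((r : Int), (c : Int)) ∉ sp) :
    (∑ j ∈ Finset.range n,
        (if ((i : Int), (j : Int)) ∈ PySem.Set.add sp ((r : Int), (c : Int)) then (1 : Int) else 0))
      = (∑ j ∈ Finset.range n, (if ((i : Int), (j : Int)) ∈ sp then (1 : Int) else 0))
        + (if i = r then 1 else 0) := by
  have hpt : ∀ j ∈ Finset.range n,
      (if ((i : Int), (j : Int)) ∈ PySem.Set.add sp ((r : Int), (c : Int)) then (1 : Int) else 0)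
        = (if ((i : Int), (j : Int)) ∈ sp then (1 : Int) else 0)
          + (if i = r ∧ j = c then (1 : Int) else 0) := by
    intro j _
    rw [if_congr ((PySem.Set.mem_add sp _ _).trans (or_congr Iff.rfl (pv_pair_cast_eq i j r c))) rfl rfl]
    exact pv_ind_split (fun hb => hfresh (by rw [← hb.2.1, ← hb.2.2]; exact hb.1))
  rw [Finset.sum_congr rfl hpt, Finset.sum_add_distrib]
  congr 1
  by_cases hir : i = r
  · simp [hir, Finset.sum_ite_eq' (Finset.range n) c (fun _ => (1 : Int)), Finset.mem_range, hc]
  · simp [hir]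

theorem pv_col_sum_add (n : Nat) (sp : List (Int × Int)) (r c j : Nat) (hr : r < n)
    (hfresh : ((r : Int), (c : Int)) ∉ sp) :
    (∑ i ∈ Finset.range n,
        (if ((i : Int), (j : Int)) ∈ PySem.Set.add sp ((r : Int), (c : Int)) then (1 : Int) else 0))
      = (∑ i ∈ Finset.range n, (if ((i : Int), (j : Int)) ∈ sp then (1 : Int) else 0))
        + (if j = c then 1 else 0) := by
  have hpt : ∀ i ∈ Finset.range n,
      (if ((i : Int), (j : Int)) ∈ PySem.Set.add sp ((r : Int), (c : Int)) then (1 : Int) else 0)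
        = (if ((i : Int), (j : Int)) ∈ sp then (1 : Int) else 0)
          + (if i = r ∧ j = c then (1 : Int) else 0) := by
    intro i _
    rw [if_congr ((PySem.Set.mem_add sp _ _).trans (or_congr Iff.rfl (pv_pair_cast_eq i j r c))) rfl rfl]
    exact pv_ind_split (fun hb => hfresh (by rw [← hb.2.1, ← hb.2.2]; exact hb.1))
  rw [Finset.sum_congr rfl hpt, Finset.sum_add_distrib]
  congr 1
  by_cases hjc : j = c
  · simp [hjc, Finset.sum_ite_eq' (Finset.range n) r (fun _ => (1 : Int)), Finset.mem_range, hr]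
  · simp [hjc]

theorem pv_reg_sum_add (region_map : List (List String)) (n : Nat) (sp : List (Int × Int))
    (r c : Nat) (g : String) (hr : r < n) (hc : c < n)
    (hfresh : ((r : Int), (c : Int)) ∉ sp) :
    (∑ i ∈ Finset.range n, ∑ j ∈ Finset.range n,
        (if (region_map.getD i []).getD j "" = g ∧
            ((i : Int), (j : Int)) ∈ PySem.Set.add sp ((r : Int), (c : Int)) then (1 : Int) else 0))
      = (∑ i ∈ Finset.range n, ∑ j ∈ Finset.range n,
          (if (region_map.getD i []).getD j "" = g ∧ ((i : Int), (j : Int)) ∈ sp then (1 : Int) else 0))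
        + (if (region_map.getD r []).getD c "" = g then 1 else 0) := by
  have hpt : ∀ i ∈ Finset.range n, ∀ j ∈ Finset.range n,
      (if (region_map.getD i []).getD j "" = g ∧
          ((i : Int), (j : Int)) ∈ PySem.Set.add sp ((r : Int), (c : Int)) then (1 : Int) else 0)
        = (if (region_map.getD i []).getD j "" = g ∧ ((i : Int), (j : Int)) ∈ sp then (1 : Int) else 0)
          + (if i = r ∧ j = c then (if (region_map.getD r []).getD c "" = g then (1 : Int) else 0) else 0) := by
    intro i _ j _
    rw [if_congr (and_congr Iff.rfl
      ((PySem.Set.mem_add sp _ _).trans (or_congr Iff.rfl (pv_pair_cast_eq i j r c)))) rfl rfl]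
    by_cases hij : i = r ∧ j = c
    · rcases hij with ⟨hi, hj⟩
      subst hi; subst hj
      by_cases hg : (region_map.getD i []).getD j "" = g
      · rw [if_pos ⟨hg, Or.inr ⟨rfl, rfl⟩⟩, if_neg (fun hb => hfresh hb.2), if_pos ⟨rfl, rfl⟩,
          if_pos hg]
        norm_num
      · rw [if_neg (fun hb => hg hb.1), if_neg (fun hb => hg hb.1), if_pos ⟨rfl, rfl⟩, if_neg hg]
        norm_num
    · rw [if_neg hij, add_zero]
      by_cases hg : (region_map.getD i []).getD j "" = g
      · by_cases hm : ((i : Int), (j : Int)) ∈ sp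
        · rw [if_pos ⟨hg, Or.inl hm⟩, if_pos ⟨hg, hm⟩]
        · rw [if_neg (fun hb => (hb.2.resolve_left hm) |> hij), if_neg (fun hb => hm hb.2)]
      · rw [if_neg (fun hb => hg hb.1), if_neg (fun hb => hg hb.1)]
  calc (∑ i ∈ Finset.range n, ∑ j ∈ Finset.range n,
        (if (region_map.getD i []).getD j "" = g ∧
            ((i : Int), (j : Int)) ∈ PySem.Set.add sp ((r : Int), (c : Int)) then (1 : Int) else 0))
      = ∑ i ∈ Finset.range n, ∑ j ∈ Finset.range n,
          ((if (region_map.getD i []).getD j "" = g ∧ ((i : Int), (j : Int)) ∈ sp then (1 : Int) else 0)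
            + (if i = r ∧ j = c then (if (region_map.getD r []).getD c "" = g then (1 : Int) else 0) else 0)) := by
        exact Finset.sum_congr rfl (fun i hi => Finset.sum_congr rfl (fun j hj => hpt i hi j hj))
    _ = _ := by
        simp only [Finset.sum_add_distrib]
        congr 1
        have hinner : ∀ i : Nat, (∑ j ∈ Finset.range n,
            (if i = r ∧ j = c then (if (region_map.getD r []).getD c "" = g then (1 : Int) else 0) else 0))
            = (if i = r then (if (region_map.getD r []).getD c "" = g then (1 : Int) else 0) else 0) := by
          intro i
          by_cases hir : i = r
          · simp [hir, Finset.sum_ite_eq' (Finset.range n) c, Finset.mem_range, hc]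
          · simp [hir]
        rw [Finset.sum_congr rfl (fun i _ => hinner i),
          Finset.sum_ite_eq' (Finset.range n) r, if_pos (Finset.mem_range.mpr hr)]


theorem pv_set_map_range {α : Type} (n i : Nat) (hi : i < n) (f : Nat → α) (v : α) :
    ((List.range n).map f).set i v = (List.range n).map (fun j => if j = i then v else f j) := by
  apply List.ext_getElem
  · simp
  intro k hk1 hk2
  have hk : k < n := by simpa using hk2
  rw [List.getElem_set, List.getElem_map, List.getElem_range, List.getElem_map, List.getElem_range]
  by_cases h : i = k
  · rw [if_pos h, if_pos h.symm]
  · rw [if_neg h, if_neg (fun hh => h hh.symm)]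

theorem pv_contains_add_of_ne (sp : List (Int × Int)) (r c i j : Nat) (hne : ¬(i = r ∧ j = c)) :
    PySem.Set.contains (PySem.Set.add sp ((r : Int), (c : Int))) ((i : Int), (j : Int))
      = PySem.Set.contains sp ((i : Int), (j : Int)) := by
  rw [pv_contains_eq_decide, pv_contains_eq_decide]
  apply decide_eq_decide.mpr
  rw [PySem.Set.mem_add]
  constructor
  · rintro (h | h)
    · exact h
    · exact absurd ((pv_pair_cast_eq i j r c).mp h) hne
  · exact Or.inl

theorem pv_render_set (n : Nat) (sp : List (Int × Int)) (r c : Nat) (hr : r < n) (hc : c < n) :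
    (pvRenderB n sp).set r (((pvRenderB n sp).getD r []).set c "*")
      = pvRenderB n (PySem.Set.add sp ((r : Int), (c : Int))) := by
  unfold pvRenderB
  rw [PySem.List.getD_map_range _ _ _ _ hr, pv_set_map_range n c hc, pv_set_map_range n r hr]
  apply List.map_congr_left
  intro i hmem
  by_cases hir : i = r
  · subst hir
    rw [if_pos rfl]
    apply List.map_congr_left
    intro j _
    by_cases hjc : j = c
    · subst hjc
      rw [if_pos rfl, pv_contains_eq_decide,
        if_pos (by simp [PySem.Set.mem_add])]
    · rw [if_neg hjc, pv_contains_add_of_ne sp _ _ _ j (fun hh => hjc hh.2)]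
  · rw [if_neg hir]
    apply List.map_congr_left
    intro j _
    rw [pv_contains_add_of_ne sp r c i j (fun hh => hir hh.1)]


def pvInv (region_map : List (List String)) (n : Nat) (board : List (List String))
    (sp : List (Int × Int)) (rc cc : List Int) (gc : PySem.Dict String Int) (idx : Nat) : Prop :=
  board = pvRenderB n sp ∧
  (∀ p ∈ sp, ∃ i j : Nat, p = ((i : Int), (j : Int)) ∧ i < n ∧ j < n ∧ i * n + j < idx) ∧
  rc = (List.range n).map (fun i => pvRowStarsA board i) ∧
  cc = (List.range n).map (fun j => pvColStarsA board j) ∧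
  (∀ g, gc.getD g 0 = pvRegStarsA board region_map g)

theorem pv_inv_mono (region_map : List (List String)) (n : Nat) (board : List (List String))
    (sp : List (Int × Int)) (rc cc : List Int) (gc : PySem.Dict String Int) (idx idx' : Nat)
    (h : pvInv region_map n board sp rc cc gc idx) (hle : idx ≤ idx') :
    pvInv region_map n board sp rc cc gc idx' := by
  obtain ⟨h1, h2, h3⟩ := h
  refine ⟨h1, fun p hp => ?_, h3⟩
  obtain ⟨i, j, hij⟩ := h2 p hp
  exact ⟨i, j, hij.1, hij.2.1, hij.2.2.1, by omega⟩

theorem pv_inv_fresh (region_map : List (List String)) (n : Nat) (board : List (List String))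
    (sp : List (Int × Int)) (rc cc : List Int) (gc : PySem.Dict String Int) (r c : Nat)
    (h : pvInv region_map n board sp rc cc gc (r * n + c)) (hc : c < n) :
    ((r : Int), (c : Int)) ∉ sp := by
  intro hmem
  obtain ⟨i, j, heq, hi, hj, hlt⟩ := h.2.1 _ hmem
  obtain ⟨hir, hjc⟩ := (pv_pair_cast_eq r c i j).mp heq
  subst hir; subst hjc
  omega

theorem pv_inv_place (region_map : List (List String)) (n : Nat) (board : List (List String))
    (sp : List (Int × Int)) (rc cc : List Int) (gc : PySem.Dict String Int) (r c : Nat)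
    (hr : r < n) (hc : c < n)
    (hInv : pvInv region_map n board sp rc cc gc (r * n + c)) :
    pvInv region_map n (board.set r ((board.getD r []).set c "*"))
      (PySem.Set.add sp ((r : Int), (c : Int)))
      (rc.set r (rc.getD r 0 + 1)) (cc.set c (cc.getD c 0 + 1))
      (gc.insert ((region_map.getD r []).getD c "")
        (gc.getD ((region_map.getD r []).getD c "") 0 + 1))
      (r * n + c + 1) := by
  obtain ⟨hb, hbound, hrc, hcc, hgc⟩ := hInv
  have hfresh : ((r : Int), (c : Int)) ∉ sp := pv_inv_fresh _ _ _ _ _ _ _ r c ⟨hb, hbound, hrc, hcc, hgc⟩ hc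
  subst hb
  refine ⟨pv_render_set n sp r c hr hc, ?_, ?_, ?_, ?_⟩
  · intro p hp
    rw [PySem.Set.mem_add] at hp
    rcases hp with hp | hp
    · obtain ⟨i, j, hij⟩ := hbound p hp
      exact ⟨i, j, hij.1, hij.2.1, hij.2.2.1, by omega⟩
    · exact ⟨r, c, hp, hr, hc, by omega⟩
  · -- row counters
    subst hrc
    rw [PySem.List.getD_map_range _ _ _ _ hr, pv_set_map_range n r hr, pv_render_set n sp r c hr hc]
    apply List.map_congr_left
    intro i hmem
    have hi : i < n := List.mem_range.mp hmem
    rw [pv_rowStars_render n (PySem.Set.add sp ((r : Int), (c : Int))) i hi,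
      pv_row_sum_add n sp r c i hc hfresh, ← pv_rowStars_render n sp i hi]
    by_cases hir : i = r
    · rw [if_pos hir, if_pos hir, hir]
    · rw [if_neg hir, if_neg hir, add_zero]
  · -- column counters
    subst hcc
    rw [PySem.List.getD_map_range _ _ _ _ hc, pv_set_map_range n c hc, pv_render_set n sp r c hr hc]
    apply List.map_congr_left
    intro j hmem
    have hj : j < n := List.mem_range.mp hmem
    rw [pv_colStars_render' n (PySem.Set.add sp ((r : Int), (c : Int))) j hj,
      pv_col_sum_add n sp r c j hr hfresh, ← pv_colStars_render' n sp j hj]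
    by_cases hjc : j = c
    · rw [if_pos hjc, if_pos hjc, hjc]
    · rw [if_neg hjc, if_neg hjc, add_zero]
  · -- region counters
    intro g
    rw [pv_render_set n sp r c hr hc,
      pv_regStars_render region_map n (PySem.Set.add sp ((r : Int), (c : Int))) g,
      pv_reg_sum_add region_map n sp r c g hr hc hfresh, ← pv_regStars_render region_map n sp g,
      PySem.Dict.getD_insert]
    by_cases hg : g = (region_map.getD r []).getD c ""
    · rw [if_pos hg, if_pos hg.symm, hgc, hg]
    · rw [if_neg hg, if_neg (fun hh => hg hh.symm), add_zero, hgc]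


theorem pv_probe (n : Nat) (sp : List (Int × Int))
    (hb : ∀ p ∈ sp, ∃ i j : Nat, p = ((i : Int), (j : Int)) ∧ i < n ∧ j < n) (x y : Int) :
    (decide (0 ≤ x ∧ x < (n : Int) ∧ 0 ≤ y ∧ y < (n : Int)) &&
        decide (((pvRenderB n sp).getD x.toNat []).getD y.toNat "" = "*"))
      = decide ((x, y) ∈ sp) := by
  by_cases hin : 0 ≤ x ∧ x < (n : Int) ∧ 0 ≤ y ∧ y < (n : Int)
  · rw [decide_eq_true hin, Bool.true_and]
    apply decide_eq_decide.mpr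
    rw [pv_render_cell_star n sp x.toNat y.toNat]
    have hx : (x.toNat : Int) = x := Int.toNat_of_nonneg hin.1
    have hy : (y.toNat : Int) = y := Int.toNat_of_nonneg hin.2.2.1
    constructor
    · intro h
      rw [← hx, ← hy]
      exact h.2.2
    · intro h
      refine ⟨by omega, by omega, ?_⟩
      rw [hx, hy]
      exact h
  · rw [decide_eq_false hin, Bool.false_and]
    symm
    apply decide_eq_false
    intro hmem
    obtain ⟨i, j, heq, hi, hj⟩ := hb _ hmem
    obtain ⟨hx, hy⟩ := Prod.ext_iff.mp heq
    simp only at hx hy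
    exact hin ⟨by omega, by omega, by omega, by omega⟩

theorem pv_adj_eq (n : Nat) (sp : List (Int × Int)) (r c : Nat) (hr : r < n) (hc : c < n)
    (hbound : ∀ p ∈ sp, ∃ i j : Nat, p = ((i : Int), (j : Int)) ∧ i < n ∧ j < n ∧ i * n + j < r * n + c) :
    (([-1, 0, 1] : List Int).any (fun dr => ([-1, 0, 1] : List Int).any (fun dc =>
        let nr : Int := (r : Int) + dr
        let nc : Int := (c : Int) + dc
        decide (0 ≤ nr ∧ nr < (n : Int) ∧ 0 ≤ nc ∧ nc < (n : Int)) &&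
          decide (((pvRenderB n sp).getD nr.toNat []).getD nc.toNat "" = "*"))))
      = pvAdjB sp (r : Int) (c : Int) := by
  have hb : ∀ p ∈ sp, ∃ i j : Nat, p = ((i : Int), (j : Int)) ∧ i < n ∧ j < n :=
    fun p hp => (hbound p hp).elim (fun i h => h.elim (fun j hh => ⟨i, j, hh.1, hh.2.1, hh.2.2.1⟩))
  have hdead : ∀ (x y : Int),
      ((x = (r : Int) ∧ ((c : Int) ≤ y)) ∨ x = (r : Int) + 1) → decide ((x, y) ∈ sp) = false := by
    intro x y hxy
    apply decide_eq_false
    intro hmem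
    obtain ⟨i, j, heq, hi, hj, hlt⟩ := hbound _ hmem
    obtain ⟨hx, hy⟩ := (Prod.ext_iff.mp heq)
    simp only at hx hy
    have hn1 : (r + 1) * n = r * n + n := by ring
    rcases hxy with ⟨hxr, hyc⟩ | hx1
    · have : i = r := by omega
      subst this
      have : c ≤ j := by omega
      omega
    · have : i = r + 1 := by omega
      subst this
      omega
  simp only [List.any_cons, List.any_nil, Bool.or_false]
  simp only [pv_probe n sp hb]
  unfold pvAdjB
  simp only [pv_contains_eq_decide]
  rw [hdead ((r : Int) + 0) ((c : Int) + 0) (Or.inl ⟨by omega, by omega⟩),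
    hdead ((r : Int) + 0) ((c : Int) + 1) (Or.inl ⟨by omega, by omega⟩),
    hdead ((r : Int) + 1) ((c : Int) + -1) (Or.inr (by omega)),
    hdead ((r : Int) + 1) ((c : Int) + 0) (Or.inr (by omega)),
    hdead ((r : Int) + 1) ((c : Int) + 1) (Or.inr (by omega))]
  simp only [Bool.or_false]
  have e1 : ∀ a : Int, a + -1 = a - 1 := fun a => by ring
  simp only [e1, add_zero]
  apply Bool.eq_iff_iff.mpr
  simp only [Bool.or_eq_true]
  tauto


theorem pv_all_and {α : Type} (l : List α) (p q : α → Bool) :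
    l.all (fun x => p x && q x) = (l.all p && l.all q) := by
  apply Bool.eq_iff_iff.mpr
  simp [List.all_eq_true, Bool.and_eq_true, forall_and]

theorem pv_valid_eq (region_map : List (List String)) (stars : Int) (n : Nat)
    (sp : List (Int × Int)) (rc cc : List Int) (gc : PySem.Dict String Int) (r c : Nat)
    (hr : r < n) (hc : c < n)
    (hInv : pvInv region_map n (pvRenderB n sp) sp rc cc gc (r * n + c)) :
    pvIsValidA (pvRenderB n sp) r c region_map stars =
      ((decide (rc.getD r 0 < stars) && decide (cc.getD c 0 < stars) &&
          !pvAdjB sp (r : Int) (c : Int)) &&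
        decide (gc.getD ((region_map.getD r []).getD c "") 0 < stars)) := by
  obtain ⟨_, hbound, hrc, hcc, hgc⟩ := hInv
  have hrcv : rc.getD r 0 = pvRowStarsA (pvRenderB n sp) r := by
    rw [hrc, PySem.List.getD_map_range _ _ _ _ hr]
  have hccv : cc.getD c 0 = pvColStarsA (pvRenderB n sp) c := by
    rw [hcc, PySem.List.getD_map_range _ _ _ _ hc]
  unfold pvIsValidA
  simp only [pv_render_length]
  rw [pv_adj_eq n sp r c hr hc hbound, hrcv, hccv, hgc]
  by_cases h1 : pvRowStarsA (pvRenderB n sp) r ≥ stars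
  · rw [if_pos h1, decide_eq_false (by omega : ¬ pvRowStarsA (pvRenderB n sp) r < stars)]
    simp
  rw [if_neg h1, decide_eq_true (by omega : pvRowStarsA (pvRenderB n sp) r < stars)]
  by_cases h2 : pvColStarsA (pvRenderB n sp) c ≥ stars
  · rw [if_pos h2, decide_eq_false (by omega : ¬ pvColStarsA (pvRenderB n sp) c < stars)]
    simp
  rw [if_neg h2, decide_eq_true (by omega : pvColStarsA (pvRenderB n sp) c < stars)]
  by_cases h3 : pvRegStarsA (pvRenderB n sp) region_map
      ((region_map.getD r []).getD c "") ≥ stars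
  · rw [if_pos h3, decide_eq_false (by omega : ¬ pvRegStarsA (pvRenderB n sp) region_map
        ((region_map.getD r []).getD c "") < stars)]
    simp
  rw [if_neg h3, decide_eq_true (by omega : pvRegStarsA (pvRenderB n sp) region_map
      ((region_map.getD r []).getD c "") < stars)]
  cases hA : pvAdjB sp (r : Int) (c : Int) <;> simp

theorem pv_complete_eq (region_map : List (List String)) (stars : Int) (n : Nat)
    (sp : List (Int × Int)) (rc cc : List Int) (gc : PySem.Dict String Int) (idx : Nat)
    (hInv : pvInv region_map n (pvRenderB n sp) sp rc cc gc idx) :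
    pvIsCompleteA (pvRenderB n sp) region_map stars =
      (rc.all (fun x => decide (x = stars)) && cc.all (fun x => decide (x = stars)) &&
        (PySem.Set.ofList (region_map.flatMap (fun row => row))).all
          (fun g => decide (gc.getD g 0 = stars))) := by
  obtain ⟨_, _, hrc, hcc, hgc⟩ := hInv
  unfold pvIsCompleteA
  simp only [pv_render_length]
  rw [hrc, hcc, List.all_map, List.all_map]
  congr 1
  · rw [pv_all_and]
    rfl
  · exact List.all_congr rfl (fun g => by rw [hgc g])


theorem pv_main (region_map : List (List String)) (stars : Int) (n : Nat) :
    ∀ (fuel : Nat) (r c : Nat) (board : List (List String)) (sp : List (Int × Int))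
      (rc cc : List Int) (gc : PySem.Dict String Int),
      ((r < n ∧ c < n) ∨ (r = n ∧ c = 0)) →
      n * n - (r * n + c) < fuel →
      pvInv region_map n board sp rc cc gc (r * n + c) →
      pvBtA region_map stars n fuel board r c =
        Option.map (pvRenderB n) (pvBtB region_map stars n fuel (r * n + c) sp rc cc gc) := by
  intro fuel
  induction fuel with
  | zero =>
    intro r c board sp rc cc gc _ hfuel _
    exact absurd hfuel (by omega)
  | succ f ih =>
    intro r c board sp rc cc gc hpos hfuel hInv
    have hb := hInv.1
    rcases hpos with ⟨hr, hc⟩ | ⟨hr, hc⟩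
    · -- interior cell: r < n, c < n
      have hn : 0 < n := by omega
      have hmul : (r + 1) * n = r * n + n := by ring
      have hlt : r * n + c < n * n := by
        have h2 : (r + 1) * n ≤ n * n := Nat.mul_le_mul_right _ hr
        omega
      have hdiv : (r * n + c) / n = r := by
        rw [Nat.mul_comm r n, Nat.mul_add_div hn, Nat.div_eq_of_lt hc, Nat.add_zero]
      have hmod : (r * n + c) % n = c := by
        rw [Nat.mul_comm r n, Nat.mul_add_mod, Nat.mod_eq_of_lt hc]
      have hstep : ∀ (board' : List (List String)) (sp' : List (Int × Int))
          (rc' cc' : List Int) (gc' : PySem.Dict String Int),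
          pvInv region_map n board' sp' rc' cc' gc' (r * n + c + 1) →
          pvBtA region_map stars n f board' (if c + 1 < n then r else r + 1)
              (if c + 1 < n then c + 1 else 0)
            = Option.map (pvRenderB n) (pvBtB region_map stars n f (r * n + c + 1) sp' rc' cc' gc') := by
        intro board' sp' rc' cc' gc' hInv'
        by_cases hc1 : c + 1 < n
        · rw [if_pos hc1, if_pos hc1]
          have e : r * n + (c + 1) = r * n + c + 1 := by omega
          have h := ih r (c + 1) board' sp' rc' cc' gc' (Or.inl ⟨hr, hc1⟩) (by omega)
            (by rw [e]; exact hInv')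
          rw [e] at h
          exact h
        · rw [if_neg hc1, if_neg hc1]
          have hceq : c + 1 = n := by omega
          have e : (r + 1) * n + 0 = r * n + c + 1 := by omega
          have hpos' : (r + 1 < n ∧ 0 < n) ∨ (r + 1 = n ∧ 0 = 0) := by
            by_cases h : r + 1 < n
            · exact Or.inl ⟨h, hn⟩
            · exact Or.inr ⟨by omega, rfl⟩
          have h := ih (r + 1) 0 board' sp' rc' cc' gc' hpos' (by omega) (by rw [e]; exact hInv')
          rw [e] at h
          exact h
      subst hb
      simp only [pvBtA, pvBtB]
      rw [if_neg (by omega : ¬ r = n), if_neg (by omega : ¬ r * n + c = n * n)]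
      simp only [hdiv, hmod]
      rw [pv_valid_eq region_map stars n sp rc cc gc r c hr hc hInv]
      have hXcase : (decide (rc.getD r 0 < stars) && decide (cc.getD c 0 < stars) &&
          !pvAdjB sp (r : Int) (c : Int)) = true ∨
        (decide (rc.getD r 0 < stars) && decide (cc.getD c 0 < stars) &&
          !pvAdjB sp (r : Int) (c : Int)) = false := by
        cases (decide (rc.getD r 0 < stars) && decide (cc.getD c 0 < stars) &&
          !pvAdjB sp (r : Int) (c : Int)) <;> simp
      rcases hXcase with hX | hX
      · by_cases hY : gc.getD ((region_map.getD r []).getD c "") 0 < stars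
        · rw [if_pos (by rw [hX]; simpa using hY), if_pos hX, if_pos hY]
          rw [hstep _ _ _ _ _ (pv_inv_place region_map n (pvRenderB n sp) sp rc cc gc r c hr hc hInv)]
          cases hB : pvBtB region_map stars n f (r * n + c + 1)
              (PySem.Set.add sp ((r : Int), (c : Int)))
              (rc.set r (rc.getD r 0 + 1)) (cc.set c (cc.getD c 0 + 1))
              (gc.insert ((region_map.getD r []).getD c "")
                (gc.getD ((region_map.getD r []).getD c "") 0 + 1)) with
          | some s => simp
          | none =>
            simp only [Option.map_none]
            exact hstep _ _ _ _ _ (pv_inv_mono region_map n (pvRenderB n sp) sp rc cc gc _ _ hInv (by omega))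
        · rw [if_neg (by rw [hX]; simpa using hY), if_pos hX, if_neg hY]
          exact hstep _ _ _ _ _ (pv_inv_mono region_map n (pvRenderB n sp) sp rc cc gc _ _ hInv (by omega))
      · have hnA : ¬ (((decide (rc.getD r 0 < stars) && decide (cc.getD c 0 < stars) &&
            !pvAdjB sp (r : Int) (c : Int)) &&
            decide (gc.getD ((region_map.getD r []).getD c "") 0 < stars)) = true) := by
          rw [hX]; simp
        have hnB : ¬ ((decide (rc.getD r 0 < stars) && decide (cc.getD c 0 < stars) &&
            !pvAdjB sp (r : Int) (c : Int)) = true) := by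
          rw [hX]; simp
        rw [if_neg hnA, if_neg hnB]
        exact hstep _ _ _ _ _ (pv_inv_mono region_map n (pvRenderB n sp) sp rc cc gc _ _ hInv (by omega))
    · -- r = n, c = 0: completion check
      subst hr; subst hc
      have hb2 := hInv.1
      subst hb2
      simp only [pvBtA, pvBtB, Nat.add_zero, if_true]
      rw [pv_complete_eq region_map stars r sp rc cc gc _ hInv]
      by_cases hcomp : (rc.all (fun x => decide (x = stars)) && cc.all (fun x => decide (x = stars)) &&
          (PySem.Set.ofList (region_map.flatMap (fun row => row))).all
            (fun g => decide (gc.getD g 0 = stars))) = true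
      · rw [if_pos hcomp, if_pos hcomp]
        simp
      · rw [if_neg hcomp, if_neg hcomp]
        simp


theorem pv_init_inv (region_map : List (List String)) (n : Nat) :
    pvInv region_map n (List.replicate n (List.replicate n "."))
      [] (List.replicate n 0) (List.replicate n 0) PySem.Dict.empty 0 := by
  have hempty : pvRenderB n ([] : List (Int × Int)) = List.replicate n (List.replicate n ".") := by
    unfold pvRenderB
    simp [List.map_const']
  refine ⟨hempty.symm, by simp, ?_, ?_, ?_⟩
  · rw [← hempty]
    symm
    calc (List.range n).map (fun i => pvRowStarsA (pvRenderB n []) i)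
        = (List.range n).map (fun _ => (0 : Int)) :=
          List.map_congr_left (fun i hi => by
            rw [pv_rowStars_render n [] i (List.mem_range.mp hi)]; simp)
      _ = List.replicate n 0 := by simp [List.map_const']
  · rw [← hempty]
    symm
    calc (List.range n).map (fun j => pvColStarsA (pvRenderB n []) j)
        = (List.range n).map (fun _ => (0 : Int)) :=
          List.map_congr_left (fun j hj => by
            rw [pv_colStars_render' n [] j (List.mem_range.mp hj)]; simp)
      _ = List.replicate n 0 := by simp [List.map_const']
  · intro g
    rw [← hempty, pv_regStars_render]
    simp [PySem.Dict.getD_empty]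

-- ===== VERDICT (by name: the statement is the Claim_ definition above) =====
theorem solve_star_battle_spec : Claim_equal_solve_star_battle := by
  unfold Claim_equal_solve_star_battle Spec_solve_star_battle
  intro region_map stars _ _
  simp only [solve_star_battle, solve_star_battle_alt]
  have hpos : (0 < region_map.length ∧ 0 < region_map.length) ∨
      (0 = region_map.length ∧ 0 = 0) := by
    by_cases hn : 0 < region_map.length
    · exact Or.inl ⟨hn, hn⟩
    · exact Or.inr ⟨by omega, rfl⟩
  have e : 0 * region_map.length + 0 = 0 := by omega
  have h := pv_main region_map stars region_map.length
    (region_map.length * region_map.length + 1) 0 0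
    (List.replicate region_map.length (List.replicate region_map.length "."))
    PySem.Set.empty (List.replicate region_map.length 0) (List.replicate region_map.length 0)
    PySem.Dict.empty hpos (by omega) (by rw [e]; exact pv_init_inv region_map region_map.length)
  rw [e] at h
  rw [h]
  cases hB : pvBtB region_map stars region_map.length
      (region_map.length * region_map.length + 1) 0 PySem.Set.empty
      (List.replicate region_map.length 0) (List.replicate region_map.length 0)
      PySem.Dict.empty <;> rfl
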